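-- pv_equiv track=rewrite | github.com/zacharyacutey/Mathematical-Programming | Lib/utils.py | replace_unary
-- ===== SOURCE A (Python) =====
-- atd={
--   '$uni': u'\u222a',
--   '$img': u'\u2111',
--   '$pos': u'\u2214',
--   '$neg': u'\u2238',
--   '$equ': u'\u225f',
--   '$els': u'\u219b',
--   '$ior': u'\u2228',
--   '$rea': u'\u211c',
--   '$pro': u'\u03a0',
--   '$leq': u'\u2264',
--   '$unp': u'\u220b',
--   '$neq': u'\u2260',
--   '$seq': u'\u2261',
--   '$len': u'\u03c9',
--   '$mem': u'\u2208',
--   '$flb': u'\u230a',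
--   '$fle': u'\u230b',
--   '$and': u'\u2227',
--   '$ift': u'\u2192',
--   '$sup': u'\u2283',
--   '$sum': u'\u03a3',
--   '$int': u'\u2229',
--   '$cee': u'\u2309',
--   '$sbe': u'\u2286',
--   '$sub': u'\u2282',
--   '$spe': u'\u2287',
--   '$fun': u'\u21a6',
--   '$com': u'\u2201',
--   '$sne': u'\u2262',
--   '$geq': u'\u2265',
--   '$ceb': u'\u2308'
-- }
--
-- def ascii_to_unicode(s):
--   i=0
--   r=""
--   while i<len(s):
--     if s[i]=="*":
--       r+=u"\xd7"
--       i+=1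
--     elif s[i]=="/":
--       r+=u"\xf7"
--       i+=1
--     elif s[i:i+4] in atd.keys():
--       r+=atd[s[i:i+4]]
--       i+=4
--     else:
--       r+=s[i]
--       i+=1
--   else:
--     return s
--   return r
--
-- def alphabetic(c):
--   return c in "abcdefghijklmnopqrstuvwxyzABCDEFGHIJKLMNOPQRSTUVWXYZ"
--
-- def numeric(c):
--   return c in "0123456789"
--
-- def alphanumeric(c):
--   return alphabetic(c) or numeric(c)
--
-- def is_unary(s,p):
--   if p==0:
--     return True
--   return not alphanumeric(s[p-1])
--
-- def unary_char(c):
--   if c=="+":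
--     return ascii_to_unicode("$pos")
--   if c=="-":
--     return ascii_to_unicode("$neg")
--   return c
--
-- def replace_unary(s):
--   r=[]
--   for i in range(len(s)):
--     if is_unary(s,i):
--       r.append(unary_char(s[i]))
--     else:
--       r.append(s[i])
--   return ''.join(r)
-- ===== SOURCE B (Python) =====
-- ALNUM = 'abcdefghijklmnopqrstuvwxyzABCDEFGHIJKLMNOPQRSTUVWXYZ0123456789'
--
-- def replace_unary(s):
--     # Stage 1: mark every sign with a sentinel (input is printable ASCII, so
--     # '\x00'/'\x01' cannot occur in s).
--     t = s.replace('+', '\x00').replace('-', '\x01')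
--     # Stage 2: un-mark the binary ones, i.e. those directly preceded by an
--     # ASCII alphanumeric character.
--     for a in ALNUM:
--         t = t.replace(a + '\x00', a + '+').replace(a + '\x01', a + '-')
--     # Stage 3: the remaining sentinels are unary; expand them.
--     return t.replace('\x00', '$pos').replace('\x01', '$neg')
-- ===== Notes on version B (the rewrite author's own statement) =====
-- stated objective: faster
-- what changed: B replaces A's per-character index loop with its is_unary/unary_char helper calls by three staged whole-string replace passes: mark every '+'/'-' with a sentinel byte, un-mark those preceded by each of the 62 ASCII alphanumerics via global two-character replaces, then expand the surviving sentinels to '$pos'/'$neg'; the traversals run inside C-level str.replace instead of a Python-level loop.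
import Mathlib
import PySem

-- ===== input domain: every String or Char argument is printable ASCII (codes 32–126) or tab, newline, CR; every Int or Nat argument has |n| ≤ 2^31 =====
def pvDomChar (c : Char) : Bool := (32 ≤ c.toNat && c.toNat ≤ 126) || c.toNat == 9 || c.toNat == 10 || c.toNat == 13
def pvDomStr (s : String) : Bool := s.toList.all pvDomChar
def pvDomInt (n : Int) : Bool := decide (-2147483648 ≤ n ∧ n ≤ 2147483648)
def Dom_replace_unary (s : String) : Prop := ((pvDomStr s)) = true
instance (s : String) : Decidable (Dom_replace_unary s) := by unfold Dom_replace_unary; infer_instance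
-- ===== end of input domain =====

-- B replaces A's per-index scan (with its is_unary/unary_char helpers and the dead while/else pass of
-- ascii_to_unicode) by three staged whole-string replace passes over sentinel bytes; same return value.

-- ===== PORT A =====
-- 'c in "abc…XYZ"': c is always a single character here, so substring membership is list membership
def alphabetic (c : Char) : Bool :=
  "abcdefghijklmnopqrstuvwxyzABCDEFGHIJKLMNOPQRSTUVWXYZ".toList.contains c

def numeric (c : Char) : Bool := "0123456789".toList.contains c

def alphanumeric (c : Char) : Bool := alphabetic c || numeric c

-- is_unary(s, p): p is a loop index of replace_unary, always 0 ≤ p < len(s); s[p-1] with p ≥ 1 is in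
-- range, so the default of getD is never consulted
def is_unary (s : List Char) (p : Nat) : Bool :=
  if p = 0 then true else !alphanumeric (s.getD (p - 1) ' ')

-- ascii_to_unicode: its while loop contains no break, so the 'else: return s' clause always runs and
-- the function returns s unchanged (the accumulator r is dead code); ported as the identity it computes
def ascii_to_unicode (s : String) : String := s

def unary_char (c : Char) : String :=
  if c = '+' then ascii_to_unicode "$pos"
  else if c = '-' then ascii_to_unicode "$neg"
  else String.ofList [c]

-- 'for i in range(len(s)): r.append(…)'
def replaceUnaryLoop (s : List Char) (i : Nat) (r : List String) : List String :=
  if h : i < s.length then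
    replaceUnaryLoop s (i + 1)
      (r ++ [if is_unary s i then unary_char s[i] else String.ofList [s[i]]])
  else r
termination_by s.length - i

def replace_unary (s : String) : String :=
  PySem.Str.join "" (replaceUnaryLoop s.toList 0 [])

-- ===== PORT B =====
def ALNUM : String := "abcdefghijklmnopqrstuvwxyzABCDEFGHIJKLMNOPQRSTUVWXYZ0123456789"

-- one iteration of Source B's 'for a in ALNUM' loop: t.replace(a+'\x00', a+'+').replace(a+'\x01', a+'-')
def unmarkStage (t : String) (a : Char) : String :=
  PySem.Str.replace (PySem.Str.replace t (String.ofList [a, '\x00']) (String.ofList [a, '+']))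
    (String.ofList [a, '\x01']) (String.ofList [a, '-'])

def replace_unary_alt (s : String) : String :=
  let t := PySem.Str.replace (PySem.Str.replace s "+" "\x00") "-" "\x01"
  let t := ALNUM.toList.foldl unmarkStage t
  PySem.Str.replace (PySem.Str.replace t "\x00" "$pos") "\x01" "$neg"

-- ===== PRECONDITION & SPEC =====
def Spec_replace_unary (s : String) (out : String) : Prop := out = replace_unary_alt s
instance (s : String) (out : String) : Decidable (Spec_replace_unary s out) := by unfold Spec_replace_unary; infer_instance

-- ===== CLAIM (what is proved, stated in full; the proofs are below) =====
def Claim_equal_replace_unary : Prop := ∀ (s : String), Dom_replace_unary s → Spec_replace_unary s (replace_unary s)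

-- ===== LEMMAS AND PROOFS =====

-- Python str.replace with a ONE-character pattern is a character-wise flatMap
def repChar (x : Char) (r : List Char) (l : List Char) : List Char :=
  l.flatMap (fun c => if c = x then r else [c])

theorem go_single (x : Char) (r : List Char) :
    ∀ (fuel : Nat) (l acc : List Char), l.length ≤ fuel →
      PySem.Chars.replace.go [x] r fuel l acc = acc.reverse ++ repChar x r l := by
  intro fuel
  induction fuel with
  | zero =>
    intro l acc h
    have : l = [] := by cases l <;> simp_all
    subst this
    simp [PySem.Chars.replace.go, repChar]
  | succ n ih =>
    intro l acc h
    cases l with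
    | nil => simp [PySem.Chars.replace.go, repChar]
    | cons c t =>
      by_cases hc : c = x
      · subst hc
        have hp : List.isPrefixOf [c] (c :: t) = true := by simp [List.isPrefixOf]
        simp only [PySem.Chars.replace.go, hp, if_true, List.length_cons, List.length_nil,
          List.drop_succ_cons, List.drop_zero]
        rw [ih t (r.reverse ++ acc) (by simpa using Nat.le_of_succ_le_succ h)]
        simp [repChar]
      · have hp : List.isPrefixOf [x] (c :: t) = false := by
          simp [List.isPrefixOf]; exact fun hxc => (hc hxc.symm).elim
        simp only [PySem.Chars.replace.go, hp, Bool.false_eq_true, if_false]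
        rw [ih t (c :: acc) (by simpa using Nat.le_of_succ_le_succ h)]
        simp [repChar, hc]

theorem replace_single (l : List Char) (x : Char) (r : List Char) :
    PySem.Chars.replace l [x] r = repChar x r l := by
  simp only [PySem.Chars.replace, List.isEmpty_cons, Bool.false_eq_true, if_false]
  simpa using go_single x r l.length l [] le_rfl

theorem repChar_cons' (x : Char) (r : List Char) (c : Char) (l : List Char) :
    repChar x r (c :: l) = (if c = x then r else [c]) ++ repChar x r l := by
  simp [repChar]

theorem repChar_append (x : Char) (r : List Char) (l1 l2 : List Char) :
    repChar x r (l1 ++ l2) = repChar x r l1 ++ repChar x r l2 := by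
  simp [repChar]

-- pointwise view of a TWO-character replace [a,x] → [a,y]: each x whose predecessor is a becomes y
def pw (a x y : Char) : Char → List Char → List Char
  | _, [] => []
  | p, c :: t => (if p = a ∧ c = x then y else c) :: pw a x y c t

def pwS (a x y : Char) : List Char → List Char
  | [] => []
  | c :: t => c :: pw a x y c t

theorem pw_eq_pwS (a x y p : Char) (l : List Char) (h : ¬(p = a ∧ l.head? = some x)) :
    pw a x y p l = pwS a x y l := by
  cases l with
  | nil => rfl
  | cons c t =>
    simp only [pw, pwS]
    rw [if_neg (by simp_all)]

theorem go_pair (a x y : Char) (hax : a ≠ x) :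
    ∀ (fuel : Nat) (l acc : List Char), l.length ≤ fuel →
      PySem.Chars.replace.go [a, x] [a, y] fuel l acc = acc.reverse ++ pwS a x y l := by
  intro fuel
  induction fuel with
  | zero =>
    intro l acc h
    have : l = [] := by cases l <;> simp_all
    subst this
    simp [PySem.Chars.replace.go, pwS]
  | succ n ih =>
    intro l acc h
    cases l with
    | nil => simp [PySem.Chars.replace.go, pwS]
    | cons c t =>
      by_cases hp : List.isPrefixOf [a, x] (c :: t) = true
      · obtain ⟨d, t', rfl⟩ : ∃ d t', t = d :: t' := by
          cases t with
          | nil => simp [List.isPrefixOf] at hp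
          | cons d t' => exact ⟨d, t', rfl⟩
        have hca : a = c ∧ x = d := by
          have := hp
          simp only [List.isPrefixOf, Bool.and_eq_true, beq_iff_eq] at this
          exact ⟨this.1, this.2.1⟩
        obtain ⟨rfl, rfl⟩ := hca
        simp only [PySem.Chars.replace.go, hp, if_true, List.length_cons, List.length_nil,
          List.drop_succ_cons, List.drop_zero]
        rw [ih t' ([a, y].reverse ++ acc) (by simp at h ⊢; omega)]
        have hrw : pwS a x y (a :: x :: t') = a :: y :: pwS a x y t' := by
          show a :: pw a x y a (x :: t') = a :: y :: pwS a x y t'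
          rw [show pw a x y a (x :: t') = y :: pw a x y x t' from by
            show (if a = a ∧ x = x then y else x) :: pw a x y x t' = _
            rw [if_pos ⟨rfl, rfl⟩]]
          rw [pw_eq_pwS a x y x t' (by rintro ⟨rfl, _⟩; exact hax rfl)]
        rw [hrw]
        simp
      · simp only [PySem.Chars.replace.go, hp, if_false]
        rw [ih t (c :: acc) (by simpa using Nat.le_of_succ_le_succ h)]
        have hpw : pw a x y c t = pwS a x y t := by
          apply pw_eq_pwS
          rintro ⟨rfl, hh⟩
          cases t with
          | nil => simp at hh
          | cons d t' =>
            apply hp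
            simp only [List.head?_cons, Option.some.injEq] at hh
            simp [List.isPrefixOf, hh]
        simp [pwS, hpw]

theorem replace_pair (l : List Char) (a x y : Char) (hax : a ≠ x) :
    PySem.Chars.replace l [a, x] [a, y] = pwS a x y l := by
  simp only [PySem.Chars.replace, List.isEmpty_cons, Bool.false_eq_true, if_false]
  simpa using go_pair a x y hax l.length l [] le_rfl

-- state of the marked string after processing the letter sets PX (for '\x00') and PY (for '\x01')
def gsub (PX PY : List Char) : Char → List Char → List Char
  | _, [] => []
  | p, c :: t =>
    (if c = '\x00' ∧ PX.contains p then '+'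
     else if c = '\x01' ∧ PY.contains p then '-' else c) :: gsub PX PY c t

theorem gsub_nil (p : Char) (l : List Char) : gsub [] [] p l = l := by
  induction l generalizing p with
  | nil => rfl
  | cons c t ih => simp [gsub, ih]

theorem gsub_congr (PX PX' PY PY' : List Char)
    (hx : ∀ c : Char, c ∈ PX ↔ c ∈ PX') (hy : ∀ c : Char, c ∈ PY ↔ c ∈ PY') :
    ∀ (p : Char) (l : List Char), gsub PX PY p l = gsub PX' PY' p l := by
  intro p l
  induction l generalizing p with
  | nil => rfl
  | cons c t ih =>
    simp only [gsub, ih, List.cons.injEq, and_true]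
    simp only [List.contains_eq_mem]
    simp [hx, hy]

-- the transformed character is a iff the original is (a is none of the replacement characters)
theorem ghead_eq_a (PX PY : List Char) (p c a : Char)
    (h0 : a ≠ '\x00') (h1 : a ≠ '\x01') (hp : a ≠ '+') (hm : a ≠ '-') :
    ((if c = '\x00' ∧ PX.contains p then '+'
      else if c = '\x01' ∧ PY.contains p then '-' else c) = a ↔ c = a) := by
  constructor
  · intro h
    split_ifs at h with h1' h2'
    · exact absurd h.symm hp
    · exact absurd h.symm hm
    · exact h
  · intro h
    subst h
    rw [if_neg (fun hh => h0 hh.1), if_neg (fun hh => h1 hh.1)]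

-- head character of the '\x00' pass for one letter a
theorem stepX_head (PX PY : List Char) (a p p' c : Char) (haPX : PX.contains a = false)
    (h0 : a ≠ '\x00') (h1 : a ≠ '\x01') (hp : a ≠ '+') (hm : a ≠ '-')
    (hpp : p' = a ↔ p = a) :
    (if p' = a ∧ (if c = '\x00' ∧ PX.contains p then '+'
        else if c = '\x01' ∧ PY.contains p then '-' else c) = '\x00' then '+'
     else (if c = '\x00' ∧ PX.contains p then '+'
        else if c = '\x01' ∧ PY.contains p then '-' else c)) =
    (if c = '\x00' ∧ (a :: PX).contains p then '+'
     else if c = '\x01' ∧ PY.contains p then '-' else c) := by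
  have hane : p = a → ¬ p ∈ PX := by
    rintro rfl hmem; simp [List.contains_eq_mem, hmem] at haPX
  split_ifs <;> simp_all

-- head character of the '\x01' pass for one letter a
theorem stepY_head (PX PY : List Char) (a p p' c : Char) (haPY : PY.contains a = false)
    (h0 : a ≠ '\x00') (h1 : a ≠ '\x01') (hp : a ≠ '+') (hm : a ≠ '-')
    (hpp : p' = a ↔ p = a) :
    (if p' = a ∧ (if c = '\x00' ∧ PX.contains p then '+'
        else if c = '\x01' ∧ PY.contains p then '-' else c) = '\x01' then '-'
     else (if c = '\x00' ∧ PX.contains p then '+'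
        else if c = '\x01' ∧ PY.contains p then '-' else c)) =
    (if c = '\x00' ∧ PX.contains p then '+'
     else if c = '\x01' ∧ (a :: PY).contains p then '-' else c) := by
  have hane : p = a → ¬ p ∈ PY := by
    rintro rfl hmem; simp [List.contains_eq_mem, hmem] at haPY
  split_ifs <;> simp_all

-- the '\x00' pass for one letter a, seen through the pointwise view
theorem stepX (PX PY : List Char) (a : Char) (haPX : PX.contains a = false)
    (h0 : a ≠ '\x00') (h1 : a ≠ '\x01') (hp : a ≠ '+') (hm : a ≠ '-') :
    ∀ (l : List Char) (p p' : Char), (p' = a ↔ p = a) →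
      pw a '\x00' '+' p' (gsub PX PY p l) = gsub (a :: PX) PY p l := by
  intro l
  induction l with
  | nil => intro p p' _; rfl
  | cons c t ih =>
    intro p p' hpp
    simp only [gsub, pw]
    exact congrArg₂ List.cons (stepX_head PX PY a p p' c haPX h0 h1 hp hm hpp)
      (ih c _ (ghead_eq_a PX PY p c a h0 h1 hp hm))

-- the '\x01' pass for one letter a
theorem stepY (PX PY : List Char) (a : Char) (haPY : PY.contains a = false)
    (h0 : a ≠ '\x00') (h1 : a ≠ '\x01') (hp : a ≠ '+') (hm : a ≠ '-') :
    ∀ (l : List Char) (p p' : Char), (p' = a ↔ p = a) →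
      pw a '\x01' '-' p' (gsub PX PY p l) = gsub PX (a :: PY) p l := by
  intro l
  induction l with
  | nil => intro p p' _; rfl
  | cons c t ih =>
    intro p p' hpp
    simp only [gsub, pw]
    exact congrArg₂ List.cons (stepY_head PX PY a p p' c haPY h0 h1 hp hm hpp)
      (ih c _ (ghead_eq_a PX PY p c a h0 h1 hp hm))

theorem pwS_gsub_X (PX PY : List Char) (a : Char) (haPX : PX.contains a = false)
    (h0 : a ≠ '\x00') (h1 : a ≠ '\x01') (hp : a ≠ '+') (hm : a ≠ '-') (hsp : a ≠ ' ')
    (l : List Char) :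
    pwS a '\x00' '+' (gsub PX PY ' ' l) = gsub (a :: PX) PY ' ' l := by
  cases l with
  | nil => rfl
  | cons c t =>
    simp only [gsub, pwS]
    have hcont : (a :: PX).contains ' ' = PX.contains ' ' := by
      simp only [List.contains_cons]
      rw [show (' ' == a) = false from by simpa using fun h => hsp h.symm]
      simp
    refine congrArg₂ List.cons ?_
      (stepX PX PY a haPX h0 h1 hp hm t c _ (ghead_eq_a PX PY ' ' c a h0 h1 hp hm))
    rw [hcont]

theorem pwS_gsub_Y (PX PY : List Char) (a : Char) (haPY : PY.contains a = false)
    (h0 : a ≠ '\x00') (h1 : a ≠ '\x01') (hp : a ≠ '+') (hm : a ≠ '-') (hsp : a ≠ ' ')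
    (l : List Char) :
    pwS a '\x01' '-' (gsub PX PY ' ' l) = gsub PX (a :: PY) ' ' l := by
  cases l with
  | nil => rfl
  | cons c t =>
    simp only [gsub, pwS]
    have hcont : (a :: PY).contains ' ' = PY.contains ' ' := by
      simp only [List.contains_cons]
      rw [show (' ' == a) = false from by simpa using fun h => hsp h.symm]
      simp
    refine congrArg₂ List.cons ?_
      (stepY PX PY a haPY h0 h1 hp hm t c _ (ghead_eq_a PX PY ' ' c a h0 h1 hp hm))
    rw [hcont]

-- one unmark stage moves the letter a into both processed sets
theorem unmarkStage_gsub (PX PY : List Char) (a : Char) (t : String) (l : List Char)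
    (haPX : PX.contains a = false) (haPY : PY.contains a = false)
    (h0 : a ≠ '\x00') (h1 : a ≠ '\x01') (hp : a ≠ '+') (hm : a ≠ '-') (hsp : a ≠ ' ')
    (ht : t.toList = gsub PX PY ' ' l) :
    (unmarkStage t a).toList = gsub (a :: PX) (a :: PY) ' ' l := by
  simp only [unmarkStage, PySem.Str.toList_replace, String.toList_ofList]
  rw [ht]
  rw [replace_pair _ a '\x00' '+' h0, pwS_gsub_X PX PY a haPX h0 h1 hp hm hsp]
  rw [replace_pair _ a '\x01' '-' h1, pwS_gsub_Y (a :: PX) PY a haPY h0 h1 hp hm hsp]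

-- folding the stages over a duplicate-free letter list
set_option maxHeartbeats 1000000 in
theorem fold_stages (L : List Char) :
    ∀ (P : List Char) (t : String) (l : List Char),
      (L ++ P).Nodup →
      (∀ c ∈ L, c ≠ '\x00' ∧ c ≠ '\x01' ∧ c ≠ '+' ∧ c ≠ '-' ∧ c ≠ ' ') →
      t.toList = gsub P P ' ' l →
      (L.foldl unmarkStage t).toList = gsub (L.reverse ++ P) (L.reverse ++ P) ' ' l := by
  induction L with
  | nil => intro P t l _ _ ht; simpa using ht
  | cons a L ih =>
    intro P t l hnd hok ht
    obtain ⟨ha0, ha1, hap, ham, hasp⟩ := hok a (by simp)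
    have haP : P.contains a = false := by
      have h := hnd
      simp only [List.cons_append, List.nodup_cons, List.mem_append] at h
      simpa using fun hmem => h.1 (Or.inr hmem)
    have hstep := unmarkStage_gsub P P a t l haP haP ha0 ha1 hap ham hasp ht
    simp only [List.foldl_cons]
    have hnd' : (L ++ a :: P).Nodup := by
      have h : (a :: (L ++ P)).Nodup := by simpa using hnd
      have hperm : (a :: (L ++ P)).Perm (L ++ a :: P) := by
        simpa using (List.perm_middle (a := a) (l₁ := L) (l₂ := P)).symm
      exact hperm.nodup h
    have hres := ih (a :: P) (unmarkStage t a) l hnd' (fun c hc => hok c (by simp [hc])) hstep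
    rw [hres]
    apply gsub_congr
    · intro c
      simp [List.reverse_cons, List.mem_append, List.mem_cons]
    · intro c
      simp [List.reverse_cons, List.mem_append, List.mem_cons]

-- single-char flatMap replaces compose into the marking map σ
def sigmaMark (c : Char) : Char := if c = '+' then '\x00' else if c = '-' then '\x01' else c

theorem mark_eq_map (l : List Char) :
    repChar '-' ['\x01'] (repChar '+' ['\x00'] l) = l.map sigmaMark := by
  induction l with
  | nil => rfl
  | cons c t ih =>
    simp only [repChar, List.flatMap_cons] at ih ⊢
    by_cases hcp : c = '+'
    · subst hcp; simpa [sigmaMark] using ih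
    · by_cases hcm : c = '-'
      · subst hcm; simpa [sigmaMark] using ih
      · simpa [hcp, hcm, sigmaMark] using ih

-- ALNUM is A's alphabetic string followed by its numeric string
theorem contains_ALNUM (c : Char) : ALNUM.toList.contains c = alphanumeric c := by
  have h : ALNUM.toList =
      "abcdefghijklmnopqrstuvwxyzABCDEFGHIJKLMNOPQRSTUVWXYZ".toList ++ "0123456789".toList := by
    decide
  rw [h, List.contains_append]
  rfl

theorem contains_ALNUM_sigma (p : Char) : ALNUM.toList.contains (sigmaMark p) = alphanumeric p := by
  by_cases hp : p = '+'
  · subst hp; decide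
  · by_cases hm : p = '-'
    · subst hm; decide
    · rw [show sigmaMark p = p from by simp [sigmaMark, hp, hm], contains_ALNUM]

-- A's per-position string, paired with the predecessor character (' ' sentinel at position 0)
def aFun (pc : Char × Char) : String :=
  if alphanumeric pc.1 then String.ofList [pc.2] else unary_char pc.2

-- the whole of B's pipeline, characterised against A's predecessor-based choice
theorem pipeline_eq (l : List Char) :
    ∀ (p : Char), (∀ c ∈ p :: l, c ≠ '\x00' ∧ c ≠ '\x01') →
      repChar '\x01' "$neg".toList
          (repChar '\x00' "$pos".toList
            (gsub ALNUM.toList ALNUM.toList (sigmaMark p) (l.map sigmaMark))) =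
        (((p :: l).zip l).map (fun pc => (aFun pc).toList)).flatten := by
  induction l with
  | nil => intro p _; rfl
  | cons c t ih =>
    intro p hok
    obtain ⟨hc0, hc1⟩ := hok c (by simp)
    have htail := ih c (fun d hd => hok d (List.mem_cons_of_mem p hd))
    simp only [List.map_cons, gsub, List.zip_cons_cons, List.flatten_cons]
    rw [contains_ALNUM_sigma p, repChar_cons', repChar_append, htail]
    congr 1
    by_cases hcp : c = '+'
    · subst hcp
      rw [show sigmaMark '+' = '\x00' from rfl]
      by_cases hal : alphanumeric p = true
      · have hg : (if ('\x00' : Char) = '\x00' ∧ alphanumeric p = true then '+'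
            else if ('\x00' : Char) = '\x01' ∧ alphanumeric p = true then '-' else '\x00') = '+' :=
          if_pos ⟨rfl, hal⟩
        rw [hg, show aFun (p, '+') = String.ofList ['+'] from by simp [aFun, hal]]
        decide
      · have hg : (if ('\x00' : Char) = '\x00' ∧ alphanumeric p = true then '+'
            else if ('\x00' : Char) = '\x01' ∧ alphanumeric p = true then '-' else '\x00') = '\x00' := by
          rw [if_neg (fun hh => hal hh.2), if_neg (fun hh => absurd hh.1 (by decide))]
        rw [hg, show aFun (p, '+') = "$pos" from by
          simp [aFun, hal, unary_char, ascii_to_unicode]]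
        decide
    · by_cases hcm : c = '-'
      · subst hcm
        rw [show sigmaMark '-' = '\x01' from rfl]
        by_cases hal : alphanumeric p = true
        · have hg : (if ('\x01' : Char) = '\x00' ∧ alphanumeric p = true then '+'
              else if ('\x01' : Char) = '\x01' ∧ alphanumeric p = true then '-' else '\x01') = '-' := by
            rw [if_neg (fun hh => absurd hh.1 (by decide)), if_pos ⟨rfl, hal⟩]
          rw [hg, show aFun (p, '-') = String.ofList ['-'] from by simp [aFun, hal]]
          decide
        · have hg : (if ('\x01' : Char) = '\x00' ∧ alphanumeric p = true then '+'
              else if ('\x01' : Char) = '\x01' ∧ alphanumeric p = true then '-' else '\x01') = '\x01' := by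
            rw [if_neg (fun hh => absurd hh.1 (by decide)), if_neg (fun hh => hal hh.2)]
          rw [hg, show aFun (p, '-') = "$neg" from by
            simp [aFun, hal, unary_char, ascii_to_unicode]]
          decide
      · have hsc : sigmaMark c = c := by simp [sigmaMark, hcp, hcm]
        rw [hsc]
        have hg : (if c = '\x00' ∧ alphanumeric p = true then '+'
            else if c = '\x01' ∧ alphanumeric p = true then '-' else c) = c := by
          rw [if_neg (fun hh => hc0 hh.1), if_neg (fun hh => hc1 hh.1)]
        have haf : aFun (p, c) = String.ofList [c] := by
          simp only [aFun, unary_char, ascii_to_unicode]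
          rw [if_neg hcp, if_neg hcm]
          split_ifs <;> rfl
        rw [hg, haf, if_neg hc0]
        simp [repChar, hc1, String.toList_ofList]

-- ==== A side: the index loop is a map over predecessor/character pairs ====
theorem replaceUnaryLoop_append (s : List Char) (i : Nat) (r : List String) :
    replaceUnaryLoop s i r = r ++ replaceUnaryLoop s i [] := by
  induction hn : s.length - i generalizing i r with
  | zero =>
    unfold replaceUnaryLoop
    rw [dif_neg (by omega), dif_neg (by omega)]
    simp
  | succ n ih =>
    unfold replaceUnaryLoop
    by_cases h : i < s.length
    · rw [dif_pos h, dif_pos h]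
      rw [ih (i + 1) (r ++ [_]) (by omega), ih (i + 1) ([] ++ [_]) (by omega)]
      simp
    · rw [dif_neg h, dif_neg h]; simp

theorem replaceUnaryLoop_eq_drop (s : List Char) (i : Nat) (hi : i ≤ s.length) :
    replaceUnaryLoop s i [] = (((' ' :: s).zip s).map aFun).drop i := by
  have hlen : (((' ' :: s).zip s).map aFun).length = s.length := by
    simp [List.length_zip]
  induction hn : s.length - i generalizing i with
  | zero =>
    unfold replaceUnaryLoop
    rw [dif_neg (by omega)]
    rw [List.drop_of_length_le (by omega)]
  | succ n ih =>
    have h : i < s.length := by omega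
    unfold replaceUnaryLoop
    have hih := ih (i + 1) (by omega) (by omega)
    rw [dif_pos h, replaceUnaryLoop_append, hih]
    rw [List.drop_eq_getElem_cons (l := ((' ' :: s).zip s).map aFun) (i := i) (by rw [hlen]; omega)]
    rw [List.getElem_map, List.getElem_zip]
    simp only [List.nil_append, List.singleton_append]
    congr 1
    rcases i with _ | k
    · simp only [is_unary, List.getElem_cons_zero, aFun,
        show alphanumeric ' ' = false from rfl, Bool.false_eq_true, if_false]
      simp
    · simp only [List.getElem_cons_succ, aFun]
      rw [show is_unary s (k + 1) = !alphanumeric (s.getD k ' ') from by simp [is_unary]]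
      rw [List.getD_eq_getElem _ _ (by omega)]
      rcases hb : alphanumeric s[k] <;> simp

theorem join_empty_flatten (parts : List (List Char)) :
    PySem.Chars.join [] parts = parts.flatten := by
  simp only [PySem.Chars.join, List.intercalate]
  induction parts with
  | nil => rfl
  | cons h t ih =>
    cases t with
    | nil => rfl
    | cons h2 t2 => simp [List.intersperse] at ih ⊢; simpa using ih

set_option maxRecDepth 100000 in
theorem alnum_ok_bool : (ALNUM.toList.all fun c =>
    c != '\x00' && c != '\x01' && c != '+' && c != '-' && c != ' ') = true := by decide

theorem alnum_ok : ∀ c ∈ ALNUM.toList, c ≠ '\x00' ∧ c ≠ '\x01' ∧ c ≠ '+' ∧ c ≠ '-' ∧ c ≠ ' ' := by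
  intro c hc
  have h := List.all_eq_true.mp alnum_ok_bool c hc
  simp only [Bool.and_eq_true, bne_iff_ne] at h
  exact ⟨h.1.1.1.1, h.1.1.1.2, h.1.1.2, h.1.2, h.2⟩

set_option maxRecDepth 4096 in
theorem alnum_append_nil_nodup : (ALNUM.toList ++ ([] : List Char)).Nodup := by
  simp only [List.append_nil]
  decide

-- ===== VERDICT (by name: the statement is the Claim_ definition above) =====
theorem replace_unary_spec : Claim_equal_replace_unary := by
  intro s hdom
  unfold Spec_replace_unary replace_unary replace_unary_alt
  apply String.toList_inj.mp
  have hchars : ∀ c ∈ (' ' :: s.toList), c ≠ '\x00' ∧ c ≠ '\x01' := by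
    intro c hc
    rcases List.mem_cons.mp hc with h | h
    · rw [h]; exact ⟨by decide, by decide⟩
    · have hdc : pvDomChar c = true := by
        have := hdom
        unfold Dom_replace_unary pvDomStr at this
        exact List.all_eq_true.mp this c h
      constructor
      · rintro rfl; exact absurd hdc (by decide)
      · rintro rfl; exact absurd hdc (by decide)
  -- A's side: the loop is the pair map, joined on the empty separator
  rw [PySem.Str.toList_join, replaceUnaryLoop_eq_drop s.toList 0 (Nat.zero_le _), List.drop_zero,
    show ("" : String).toList = [] from rfl, join_empty_flatten, List.map_map]
  -- B's side: the three staged replaces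
  simp only [PySem.Str.toList_replace]
  rw [show ("\x00" : String).toList = ['\x00'] from rfl,
    show ("\x01" : String).toList = ['\x01'] from rfl]
  rw [replace_single, replace_single]
  have ht0 : (PySem.Str.replace (PySem.Str.replace s "+" "\x00") "-" "\x01").toList =
      gsub [] [] ' ' (s.toList.map sigmaMark) := by
    simp only [PySem.Str.toList_replace]
    rw [show ("+" : String).toList = ['+'] from rfl, show ("\x00" : String).toList = ['\x00'] from rfl,
      show ("-" : String).toList = ['-'] from rfl, show ("\x01" : String).toList = ['\x01'] from rfl]
    rw [replace_single, replace_single, mark_eq_map, gsub_nil]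
  have hfold := fold_stages ALNUM.toList []
    (PySem.Str.replace (PySem.Str.replace s "+" "\x00") "-" "\x01") (s.toList.map sigmaMark)
    alnum_append_nil_nodup
    alnum_ok
    ht0
  rw [hfold]
  rw [gsub_congr (ALNUM.toList.reverse ++ []) ALNUM.toList (ALNUM.toList.reverse ++ []) ALNUM.toList
    (fun c => by simp) (fun c => by simp) ' ' (s.toList.map sigmaMark)]
  have hmain := pipeline_eq s.toList ' ' hchars
  rw [show sigmaMark ' ' = ' ' from by decide] at hmain
  rw [hmain]
  rfl
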